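-- pv_equiv track=rewrite | github.com/devdiegocardoso/AdventOfCode | year/2015/day_05/aoc201505.py | verify_new_conditions
-- ===== SOURCE A (Python) =====
-- def find_pairs_without_overlap(entry):
--     c_dict = {}
--     i_dict = {}
--     for i in range(len(entry)-1):
--         c_dict[(entry[i],entry[i+1])] = c_dict.get((entry[i],entry[i+1]),0)
--         last_pair = i_dict.get((entry[i],entry[i+1]),(-1,-1))
--         if last_pair == (-1, -1) or last_pair != (i - 1, i):
--             i_dict[(entry[i],entry[i+1])] = (i,i+1)
--             c_dict[(entry[i],entry[i+1])] += 1
--     return any(value >= 2 for value in c_dict.values())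
--
-- def find_equal_between_char(entry):
--     return any(entry[i] == entry[i+2] for i in range(len(entry)-2))
--
-- def verify_new_conditions(entries):
--     nice = 0
--     for entry in entries:
--         has_pair = find_pairs_without_overlap(entry)
--         has_repeated_between_letters = find_equal_between_char(entry)
--         if has_pair and has_repeated_between_letters:
--             nice += 1
--     return nice,0
-- ===== SOURCE B (Python) =====
-- def find_pairs_without_overlap(entry):
--     return any(entry[i:i+2] in entry[i+2:] for i in range(len(entry)-1))
--
-- def find_equal_between_char(entry):
--     return any(entry[i] == entry[i+2] for i in range(len(entry)-2))
--
-- def verify_new_conditions(entries):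
--     return sum(1 for entry in entries
--                if find_pairs_without_overlap(entry) and find_equal_between_char(entry)), 0
-- ===== Notes on version B (the rewrite author's own statement) =====
-- stated objective: simpler
-- what changed: find_pairs_without_overlap drops the count/index dict bookkeeping for a direct substring test (entry[i:i+2] in entry[i+2:]) and the outer counting loop becomes a generator sum.
import Mathlib
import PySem

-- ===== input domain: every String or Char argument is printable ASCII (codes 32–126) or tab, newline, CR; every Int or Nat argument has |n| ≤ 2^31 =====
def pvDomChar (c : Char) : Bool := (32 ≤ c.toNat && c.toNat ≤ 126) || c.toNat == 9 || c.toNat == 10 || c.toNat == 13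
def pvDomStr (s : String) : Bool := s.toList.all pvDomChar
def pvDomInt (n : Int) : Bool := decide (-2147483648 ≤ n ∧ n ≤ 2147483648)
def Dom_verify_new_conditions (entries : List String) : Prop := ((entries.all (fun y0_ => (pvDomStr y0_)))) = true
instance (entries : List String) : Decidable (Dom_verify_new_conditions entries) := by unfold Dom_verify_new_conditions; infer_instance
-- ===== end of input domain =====

-- B replaces A's count/index-dict pass in find_pairs_without_overlap by a direct non-overlapping
-- substring test (entry[i:i+2] in entry[i+2:]) and counts nice strings with a generator sum (simpler, not faster).


-- ===== PORT A =====
-- loop body of find_pairs_without_overlap: state = (c_dict, i_dict)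
def pvPairStep (cs : List Char) (st : PySem.Dict (Char × Char) Int × PySem.Dict (Char × Char) (Int × Int)) (i : Int) :
    PySem.Dict (Char × Char) Int × PySem.Dict (Char × Char) (Int × Int) :=
  let p := (PySem.List.pyGetD cs i ' ', PySem.List.pyGetD cs (i + 1) ' ')
  let c := st.1.insert p (st.1.getD p 0)
  let last_pair := st.2.getD p (-1, -1)
  if last_pair = (-1, -1) ∨ last_pair ≠ (i - 1, i) then
    (c.insert p (c.getD p 0 + 1), st.2.insert p (i, i + 1))
  else (c, st.2)

def find_pairs_without_overlap (entry : String) : Bool :=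
  let cs := entry.toList
  let st := (PySem.List.pyRange 0 ((cs.length : Int) - 1) 1).foldl (pvPairStep cs)
              (PySem.Dict.empty, PySem.Dict.empty)
  st.1.values.any (fun v => decide (2 ≤ v))

def find_equal_between_char (entry : String) : Bool :=
  let cs := entry.toList
  (PySem.List.pyRange 0 ((cs.length : Int) - 2) 1).any (fun i =>
    PySem.List.pyGetD cs i ' ' == PySem.List.pyGetD cs (i + 2) ' ')

def verify_new_conditions (entries : List String) : Int × Int :=
  let nice := entries.foldl (fun nice entry =>
    let has_pair := find_pairs_without_overlap entry
    let has_repeated_between_letters := find_equal_between_char entry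
    if has_pair && has_repeated_between_letters then nice + 1 else nice) 0
  (nice, 0)

-- ===== PORT B =====
def pvHasPairAlt (entry : String) : Bool :=
  let cs := entry.toList
  (PySem.List.pyRange 0 ((cs.length : Int) - 1) 1).any (fun i =>
    PySem.Chars.isIn (PySem.List.slice cs (some i) (some (i + 2))) (PySem.List.slice cs (some (i + 2)) none))

def pvHasSandwichAlt (entry : String) : Bool :=
  let cs := entry.toList
  (PySem.List.pyRange 0 ((cs.length : Int) - 2) 1).any (fun i =>
    PySem.List.pyGetD cs i ' ' == PySem.List.pyGetD cs (i + 2) ' ')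

def verify_new_conditions_alt (entries : List String) : Int × Int :=
  ((entries.countP (fun entry => pvHasPairAlt entry && pvHasSandwichAlt entry) : Int), 0)

-- ===== PRECONDITION & SPEC =====
def Spec_verify_new_conditions (entries : List String) (out : Int × Int) : Prop := out = verify_new_conditions_alt entries
instance (entries : List String) (out : Int × Int) : Decidable (Spec_verify_new_conditions entries out) := by unfold Spec_verify_new_conditions; infer_instance

-- ===== CLAIM (what is proved, stated in full; the proofs are below) =====
def Claim_equal_verify_new_conditions : Prop := ∀ (entries : List String), Dom_verify_new_conditions entries → Spec_verify_new_conditions entries (verify_new_conditions entries)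

-- ===== LEMMAS AND PROOFS =====

-- the pair of characters at position i (default-padded; only used at in-range positions)
def pairAt (cs : List Char) (i : Nat) : Char × Char := (cs.getD i ' ', cs.getD (i + 1) ' ')

-- p occurs as a pair at some position < k
def occ (cs : List Char) (k : Nat) (p : Char × Char) : Prop := ∃ i, i < k ∧ pairAt cs i = p

-- p occurs at two positions < k at distance ≥ 2 (non-overlapping)
def distant (cs : List Char) (k : Nat) (p : Char × Char) : Prop :=
  ∃ i j, i + 2 ≤ j ∧ j < k ∧ pairAt cs i = p ∧ pairAt cs j = p

-- loop invariant for A's dict pass after k steps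
def pvInv (cs : List Char) (k : Nat)
    (st : PySem.Dict (Char × Char) Int × PySem.Dict (Char × Char) (Int × Int)) : Prop :=
  st.1.keys.Nodup ∧ st.2.keys.Nodup ∧ ∀ p : Char × Char,
    (st.1.contains p = true ↔ occ cs k p) ∧
    (st.2.contains p = true ↔ occ cs k p) ∧
    (occ cs k p → 1 ≤ st.1.getD p 0) ∧
    (2 ≤ st.1.getD p 0 ↔ distant cs k p) ∧
    (occ cs k p → ¬ distant cs k p →
      ∃ m, m < k ∧ pairAt cs m = p ∧ st.2.getD p (-1, -1) = ((m : Int), (m : Int) + 1) ∧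
        ∀ i, i < k → pairAt cs i = p → i = m ∨ i = m + 1)

theorem occ_succ (cs : List Char) (k : Nat) (p : Char × Char) :
    occ cs (k + 1) p ↔ occ cs k p ∨ pairAt cs k = p := by
  constructor
  · rintro ⟨i, hi, hp⟩
    rcases Nat.lt_succ_iff_lt_or_eq.mp hi with h | rfl
    · exact Or.inl ⟨i, h, hp⟩
    · exact Or.inr hp
  · rintro (⟨i, hi, hp⟩ | hp)
    · exact ⟨i, Nat.lt_succ_of_lt hi, hp⟩
    · exact ⟨k, Nat.lt_succ_self k, hp⟩

theorem distant_succ (cs : List Char) (k : Nat) (p : Char × Char) :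
    distant cs (k + 1) p ↔ distant cs k p ∨ (pairAt cs k = p ∧ ∃ i, i + 2 ≤ k ∧ pairAt cs i = p) := by
  constructor
  · rintro ⟨i, j, hij, hj, hpi, hpj⟩
    rcases Nat.lt_succ_iff_lt_or_eq.mp hj with h | rfl
    · exact Or.inl ⟨i, j, hij, h, hpi, hpj⟩
    · exact Or.inr ⟨hpj, i, hij, hpi⟩
  · rintro (⟨i, j, hij, hj, hpi, hpj⟩ | ⟨hpk, i, hik, hpi⟩)
    · exact ⟨i, j, hij, Nat.lt_succ_of_lt hj, hpi, hpj⟩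
    · exact ⟨i, k, hik, Nat.lt_succ_self k, hpi, hpk⟩

theorem pvInv_zero (cs : List Char) : pvInv cs 0 (PySem.Dict.empty, PySem.Dict.empty) := by
  refine ⟨by simp [PySem.Dict.keys_empty], by simp [PySem.Dict.keys_empty], fun p => ?_⟩
  simp [PySem.Dict.contains_empty, PySem.Dict.getD_empty, occ, distant]

theorem pvInv_step (cs : List Char) (k : Nat)
    (st : PySem.Dict (Char × Char) Int × PySem.Dict (Char × Char) (Int × Int))
    (h : pvInv cs k st) :
    pvInv cs (k + 1) (pvPairStep cs st (k : Int)) := by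
  obtain ⟨c, d⟩ := st
  obtain ⟨hc, hd, hP⟩ := h
  have hg1 : PySem.List.pyGetD cs ((k : Int)) ' ' = cs.getD k ' ' := PySem.List.pyGetD_natCast cs k ' '
  have hg2 : PySem.List.pyGetD cs ((k : Int) + 1) ' ' = cs.getD (k + 1) ' ' := by
    have : ((k : Int) + 1) = ((k + 1 : Nat) : Int) := by push_cast; ring
    rw [this, PySem.List.pyGetD_natCast]
  set p : Char × Char := pairAt cs k with hpdef
  have hbody : pvPairStep cs (c, d) (k : Int) =
      (if d.getD p (-1, -1) = (-1, -1) ∨ d.getD p (-1, -1) ≠ ((k : Int) - 1, (k : Int)) then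
        ((c.insert p (c.getD p 0)).insert p ((c.insert p (c.getD p 0)).getD p 0 + 1),
          d.insert p ((k : Int), (k : Int) + 1))
      else (c.insert p (c.getD p 0), d)) := by
    simp only [pvPairStep, hg1, hg2, hpdef, pairAt]
  rw [hbody]
  have hoccP : ¬ occ cs k p → c.contains p = false ∧ d.contains p = false ∧ c.getD p 0 = 0 ∧
      d.getD p (-1, -1) = (-1, -1) := by
    intro hno
    have h1 : c.contains p = false := by
      rcases (hP p).1 with ⟨f, _⟩
      cases hcp : c.contains p with
      | false => rfl
      | true => exact absurd (f hcp) hno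
    have h2 : d.contains p = false := by
      rcases (hP p).2.1 with ⟨f, _⟩
      cases hcp : d.contains p with
      | false => rfl
      | true => exact absurd (f hcp) hno
    exact ⟨h1, h2, PySem.Dict.getD_of_not_contains c 0 h1,
      PySem.Dict.getD_of_not_contains d (-1, -1) h2⟩
  have hdist_mono : distant cs k p → distant cs (k + 1) p := fun hx =>
    (distant_succ cs k p).2 (Or.inl hx)
  have hpairk : pairAt cs k = p := hpdef.symm
  have hdistS : ¬ occ cs k p → ¬ distant cs k p := by
    intro hno hdt
    obtain ⟨i, j, hij, hj, hpi, _⟩ := hdt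
    exact hno ⟨i, by omega, hpi⟩
  dsimp only at hc hd hP
  split_ifs with hcond <;> dsimp only [pvInv]
  · -- counted branch
    refine ⟨PySem.Dict.nodup_keys_insert _ _ _ (PySem.Dict.nodup_keys_insert _ _ _ hc),
      PySem.Dict.nodup_keys_insert _ _ _ hd, fun q => ?_⟩
    have hcget : ((c.insert p (c.getD p 0)).insert p ((c.insert p (c.getD p 0)).getD p 0 + 1)).getD q 0
        = if q = p then c.getD p 0 + 1 else c.getD q 0 := by
      by_cases hqp : q = p <;> simp [PySem.Dict.getD_insert, hqp]
    have hccont : ((c.insert p (c.getD p 0)).insert p ((c.insert p (c.getD p 0)).getD p 0 + 1)).contains q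
        = (q == p || c.contains q) := by
      simp [PySem.Dict.contains_insert]
    have hdget : (d.insert p ((k : Int), (k : Int) + 1)).getD q (-1, -1)
        = if q = p then ((k : Int), (k : Int) + 1) else d.getD q (-1, -1) := by
      simp [PySem.Dict.getD_insert]
    have hdcont : (d.insert p ((k : Int), (k : Int) + 1)).contains q = (q == p || d.contains q) := by
      simp [PySem.Dict.contains_insert]
    by_cases hq : q = p
    · subst hq
      simp only [hcget, hccont, hdget, hdcont, if_true, beq_self_eq_true, Bool.true_or]
      have hocc1 : occ cs (k + 1) p := (occ_succ cs k p).2 (Or.inr hpairk)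
      refine ⟨by simp [hocc1], by simp [hocc1], ?_, ?_, ?_⟩
      · intro _
        by_cases ho : occ cs k p
        · have := (hP p).2.2.1 ho; omega
        · have := (hoccP ho).2.2.1; omega
      · by_cases ho : occ cs k p
        · by_cases hdt : distant cs k p
          · have h2 := ((hP p).2.2.2.1).2 hdt
            exact ⟨fun _ => hdist_mono hdt, fun _ => by omega⟩
          · obtain ⟨m, hmk, hpm, hlp, hall⟩ := (hP p).2.2.2.2 ho hdt
            have hm1 : d.getD p (-1, -1) ≠ (-1, -1) := by
              rw [hlp]; intro hx; rw [Prod.mk.injEq] at hx; omega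
            have hne : d.getD p (-1, -1) ≠ ((k : Int) - 1, (k : Int)) := by
              rcases hcond with hx | hx
              · exact absurd hx hm1
              · exact hx
            have hmne : m + 1 ≠ k := by
              intro hx
              apply hne
              rw [hlp, Prod.mk.injEq]
              constructor <;> omega
            have hdk1 : distant cs (k + 1) p :=
              (distant_succ cs k p).2 (Or.inr ⟨hpairk, m, by omega, hpm⟩)
            have h1 := (hP p).2.2.1 ho
            exact ⟨fun _ => hdk1, fun _ => by omega⟩
        · have hz := (hoccP ho).2.2.1
          constructor
          · intro hx; omega
          · intro hdt
            rcases (distant_succ cs k p).1 hdt with hx | ⟨_, i, hik, hpi⟩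
            · exact absurd hx (hdistS ho)
            · exact absurd (⟨i, by omega, hpi⟩ : occ cs k p) ho
      · intro _ hnd
        by_cases ho : occ cs k p
        · by_cases hdt : distant cs k p
          · exact absurd (hdist_mono hdt) hnd
          · obtain ⟨m, hmk, hpm, hlp, hall⟩ := (hP p).2.2.2.2 ho hdt
            have hm1 : d.getD p (-1, -1) ≠ (-1, -1) := by
              rw [hlp]; intro hx; rw [Prod.mk.injEq] at hx; omega
            have hne : d.getD p (-1, -1) ≠ ((k : Int) - 1, (k : Int)) := by
              rcases hcond with hx | hx
              · exact absurd hx hm1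
              · exact hx
            have hmne : m + 1 ≠ k := by
              intro hx
              apply hne
              rw [hlp, Prod.mk.injEq]
              constructor <;> omega
            exact absurd ((distant_succ cs k p).2 (Or.inr ⟨hpairk, m, by omega, hpm⟩)) hnd
        · refine ⟨k, Nat.lt_succ_self k, hpairk, rfl, fun i hik hpi => ?_⟩
          by_cases hik' : i < k
          · exact absurd (⟨i, hik', hpi⟩ : occ cs k p) ho
          · left; omega
    · have hqbeq : (q == p) = false := by simp [hq]
      have hoccq : occ cs (k + 1) q ↔ occ cs k q := by
        rw [occ_succ]
        constructor
        · rintro (hx | hx)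
          · exact hx
          · exact absurd (hpairk.symm ▸ hx.symm : q = p) (fun hx' => hq hx')
        · exact Or.inl
      have hdistq : distant cs (k + 1) q ↔ distant cs k q := by
        rw [distant_succ]
        constructor
        · rintro (hx | ⟨hx, _⟩)
          · exact hx
          · exact absurd (hpairk.symm ▸ hx.symm : q = p) (fun hx' => hq hx')
        · exact Or.inl
      simp only [hcget, hccont, hdget, hdcont, if_neg hq, hqbeq, Bool.false_or, hoccq, hdistq]
      obtain ⟨h1, h2, h3, h4, h5⟩ := hP q
      refine ⟨h1, h2, h3, h4, fun ho hnd => ?_⟩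
      obtain ⟨m, hmk, hpm, hlp, hall⟩ := h5 ho hnd
      refine ⟨m, by omega, hpm, hlp, fun i hik hpi => ?_⟩
      by_cases hik' : i < k
      · exact hall i hik' hpi
      · exfalso
        have hik2 : i = k := by omega
        rw [hik2, hpairk] at hpi
        exact hq hpi.symm
  · -- skip branch
    push_neg at hcond
    obtain ⟨hne1, heq⟩ := hcond
    have ho : occ cs k p := by
      by_contra hno
      exact hne1 (hoccP hno).2.2.2
    refine ⟨PySem.Dict.nodup_keys_insert _ _ _ hc, hd, fun q => ?_⟩
    have hcget : (c.insert p (c.getD p 0)).getD q 0 = c.getD q 0 := by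
      by_cases hqp : q = p <;> simp [PySem.Dict.getD_insert, hqp]
    have hccont : (c.insert p (c.getD p 0)).contains q = (q == p || c.contains q) := by
      simp [PySem.Dict.contains_insert]
    by_cases hq : q = p
    · subst hq
      simp only [hcget, hccont, beq_self_eq_true, Bool.true_or]
      have hocc1 : occ cs (k + 1) p := (occ_succ cs k p).2 (Or.inr hpairk)
      have hdcont : d.contains p = true := ((hP p).2.1).2 ho
      refine ⟨by simp [hocc1], by simp [hdcont, hocc1], fun _ => (hP p).2.2.1 ho, ?_, ?_⟩
      · by_cases hdt : distant cs k p
        · have h2 := ((hP p).2.2.2.1).2 hdt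
          exact ⟨fun _ => hdist_mono hdt, fun _ => by omega⟩
        · obtain ⟨m, hmk, hpm, hlp, hall⟩ := (hP p).2.2.2.2 ho hdt
          have hkm : k = m + 1 := by
            rw [hlp, Prod.mk.injEq] at heq; omega
          have hnd1 : ¬ distant cs (k + 1) p := by
            intro hdt1
            rcases (distant_succ cs k p).1 hdt1 with hx | ⟨_, i, hik, hpi⟩
            · exact hdt hx
            · rcases hall i (by omega) hpi with hx | hx <;> omega
          have hlt := ((hP p).2.2.2.1)
          exact ⟨fun h2 => absurd (hlt.1 h2) hdt, fun hx => absurd hx hnd1⟩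
      · intro _ hnd
        have hndk : ¬ distant cs k p := fun hx => hnd (hdist_mono hx)
        obtain ⟨m, hmk, hpm, hlp, hall⟩ := (hP p).2.2.2.2 ho hndk
        have hkm : k = m + 1 := by
          rw [hlp, Prod.mk.injEq] at heq; omega
        refine ⟨m, by omega, hpm, hlp, fun i hik hpi => ?_⟩
        by_cases hik' : i < k
        · exact hall i hik' hpi
        · right; omega
    · have hqbeq : (q == p) = false := by simp [hq]
      have hoccq : occ cs (k + 1) q ↔ occ cs k q := by
        rw [occ_succ]
        constructor
        · rintro (hx | hx)
          · exact hx
          · exact absurd (hpairk.symm ▸ hx.symm : q = p) (fun hx' => hq hx')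
        · exact Or.inl
      have hdistq : distant cs (k + 1) q ↔ distant cs k q := by
        rw [distant_succ]
        constructor
        · rintro (hx | ⟨hx, _⟩)
          · exact hx
          · exact absurd (hpairk.symm ▸ hx.symm : q = p) (fun hx' => hq hx')
        · exact Or.inl
      simp only [hcget, hccont, hqbeq, Bool.false_or, hoccq, hdistq]
      obtain ⟨h1, h2, h3, h4, h5⟩ := hP q
      refine ⟨h1, h2, h3, h4, fun ho' hnd => ?_⟩
      obtain ⟨m, hmk, hpm, hlp, hall⟩ := h5 ho' hnd
      refine ⟨m, by omega, hpm, hlp, fun i hik hpi => ?_⟩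
      by_cases hik' : i < k
      · exact hall i hik' hpi
      · exfalso
        have hik2 : i = k := by omega
        rw [hik2, hpairk] at hpi
        exact hq hpi.symm

theorem pvInv_fold (cs : List Char) (k : Nat) :
    pvInv cs k ((PySem.List.pyRange 0 (k : Int) 1).foldl (pvPairStep cs)
      (PySem.Dict.empty, PySem.Dict.empty)) := by
  induction k with
  | zero => simpa [PySem.List.pyRange_zero_nat] using pvInv_zero cs
  | succ n ih =>
    have : ((n : Int) + 1) = ((n + 1 : Nat) : Int) := by push_cast; ring
    rw [← this, PySem.List.pyRange_one_succ_right (by positivity), List.foldl_append]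
    simpa using pvInv_step cs n _ ih

-- ---- bridging to the common characterization: "some pair occurs twice without overlap" ----

theorem take_two_getD (l : List Char) (h : 2 ≤ l.length) :
    l.take 2 = [l.getD 0 ' ', l.getD 1 ' '] := by
  match l with
  | [] => simp at h
  | [a] => simp at h
  | a :: b :: t => simp [List.getD]

theorem getD_drop' (cs : List Char) (m j : Nat) :
    (cs.drop m).getD j ' ' = cs.getD (m + j) ' ' := by
  simp [List.getD_eq_getElem?_getD, List.getElem?_drop]

theorem pair_prefix_iff (cs : List Char) (m : Nat) (x y : Char) :
    [x, y] <+: cs.drop m ↔ m + 1 < cs.length ∧ cs.getD m ' ' = x ∧ cs.getD (m + 1) ' ' = y := by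
  constructor
  · intro h
    have hl : 2 ≤ (cs.drop m).length := by simpa using h.length_le
    have hml : m + 1 < cs.length := by rw [List.length_drop] at hl; omega
    have ht := List.prefix_iff_eq_take.mp h
    simp only [List.length_cons, List.length_nil, Nat.zero_add] at ht
    rw [take_two_getD _ hl, getD_drop', getD_drop', Nat.add_zero] at ht
    rw [List.cons.injEq, List.cons.injEq] at ht
    exact ⟨hml, ht.1.symm, ht.2.1.symm⟩
  · rintro ⟨hml, hx, hy⟩
    have hl : 2 ≤ (cs.drop m).length := by rw [List.length_drop]; omega
    have ht := take_two_getD _ hl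
    rw [getD_drop', getD_drop', Nat.add_zero, hx, hy] at ht
    rw [← ht]
    exact List.take_prefix 2 _

theorem any_ge_two_iff (c : PySem.Dict (Char × Char) Int) (hnd : c.keys.Nodup) :
    (c.values.any (fun v => decide (2 ≤ v)) = true) ↔ ∃ p, 2 ≤ c.getD p 0 := by
  rw [List.any_eq_true]
  constructor
  · rintro ⟨v, hv, h2⟩
    rw [decide_eq_true_iff] at h2
    simp only [PySem.Dict.values] at hv
    rw [List.mem_map] at hv
    obtain ⟨⟨p, v'⟩, hpmem, hv'⟩ := hv
    refine ⟨p, ?_⟩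
    have hget := PySem.Dict.get?_of_mem_items _ hpmem hnd
    have hv2 : v' = v := hv'
    rw [PySem.Dict.getD_eq_get?_getD, hget]
    simpa [hv2] using h2
  · rintro ⟨p, hp⟩
    cases hg : c.get? p with
    | none =>
      rw [PySem.Dict.getD_eq_get?_getD, hg] at hp
      simp at hp
    | some v =>
      rw [PySem.Dict.getD_eq_get?_getD, hg] at hp
      simp at hp
      have hmem := PySem.Dict.mem_items_of_get?_eq_some _ hg
      refine ⟨v, ?_, by simpa using hp⟩
      simp only [PySem.Dict.values]
      exact List.mem_map.mpr ⟨(p, v), hmem, rfl⟩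

theorem pairs_iff (e : String) :
    find_pairs_without_overlap e = true ↔ ∃ a b : Nat, a + 2 ≤ b ∧ b + 1 < e.toList.length ∧
      pairAt e.toList a = pairAt e.toList b := by
  simp only [find_pairs_without_overlap]
  set cs := e.toList with hcs
  have hrange : PySem.List.pyRange 0 ((cs.length : Int) - 1) 1
      = PySem.List.pyRange 0 (((cs.length - 1 : Nat) : Int)) 1 := by
    rcases Nat.eq_zero_or_pos cs.length with h0 | h1
    · rw [h0]
      rw [PySem.List.pyRange_one_eq_nil (by norm_num), PySem.List.pyRange_one_eq_nil (by norm_num)]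
    · congr 1; omega
  rw [hrange]
  obtain ⟨hnd, -, hP⟩ := pvInv_fold cs (cs.length - 1)
  rw [any_ge_two_iff _ hnd]
  constructor
  · rintro ⟨p, hp⟩
    obtain ⟨i, j, hij, hjk, hpi, hpj⟩ := ((hP p).2.2.2.1).1 hp
    exact ⟨i, j, hij, by omega, hpi.trans hpj.symm⟩
  · rintro ⟨a, b, hab, hb, hpq⟩
    exact ⟨pairAt cs a, ((hP _).2.2.2.1).2 ⟨a, b, hab, by omega, rfl, hpq.symm⟩⟩

theorem alt_pairs_iff (e : String) :
    pvHasPairAlt e = true ↔ ∃ a b : Nat, a + 2 ≤ b ∧ b + 1 < e.toList.length ∧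
      pairAt e.toList a = pairAt e.toList b := by
  simp only [pvHasPairAlt]
  set cs := e.toList with hcs
  rw [List.any_eq_true]
  constructor
  · rintro ⟨x, hx, hpred⟩
    rw [PySem.List.mem_pyRange_one] at hx
    obtain ⟨hx0, hx1⟩ := hx
    obtain ⟨a, rfl⟩ := Int.eq_ofNat_of_zero_le hx0
    have ha : a + 1 < cs.length := by omega
    have h2 : ((a : Int) + 2) = ((a : Int) + ((2 : Nat) : Int)) := by norm_num
    have h3 : ((a : Int) + 2) = (((a + 2 : Nat)) : Int) := by push_cast; ring
    rw [h2, PySem.List.slice_natCast_add, ← h2, h3, PySem.List.slice_from_natCast] at hpred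
    rw [take_two_getD _ (by rw [List.length_drop]; omega), getD_drop', getD_drop',
      Nat.add_zero] at hpred
    rw [← PySem.Chars.exists_prefix_drop_iff_isIn] at hpred
    obtain ⟨j, hj⟩ := hpred
    rw [List.drop_drop, pair_prefix_iff] at hj
    obtain ⟨hb, hgx, hgy⟩ := hj
    refine ⟨a, a + 2 + j, by omega, by omega, ?_⟩
    rw [pairAt, pairAt, Prod.mk.injEq]
    exact ⟨hgx.symm, hgy.symm⟩
  · rintro ⟨a, b, hab, hb, hpq⟩
    refine ⟨(a : Int), ?_, ?_⟩
    · rw [PySem.List.mem_pyRange_one]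
      constructor
      · positivity
      · omega
    · have h2 : ((a : Int) + 2) = ((a : Int) + ((2 : Nat) : Int)) := by norm_num
      have h3 : ((a : Int) + 2) = (((a + 2 : Nat)) : Int) := by push_cast; ring
      rw [h2, PySem.List.slice_natCast_add, ← h2, h3, PySem.List.slice_from_natCast]
      rw [take_two_getD _ (by rw [List.length_drop]; omega), getD_drop', getD_drop',
        Nat.add_zero]
      rw [← PySem.Chars.exists_prefix_drop_iff_isIn]
      refine ⟨b - (a + 2), ?_⟩
      rw [List.drop_drop, pair_prefix_iff]
      rw [pairAt, pairAt, Prod.mk.injEq] at hpq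
      have hba : a + 2 + (b - (a + 2)) = b := by omega
      rw [hba]
      exact ⟨by omega, hpq.1.symm, hpq.2.symm⟩

theorem pair_helpers_eq (e : String) : find_pairs_without_overlap e = pvHasPairAlt e := by
  have h := (pairs_iff e).trans (alt_pairs_iff e).symm
  cases hA : find_pairs_without_overlap e <;> cases hB : pvHasPairAlt e
  · rfl
  · rw [hA, hB] at h
    exact absurd (h.mpr rfl) (by simp)
  · rw [hA, hB] at h
    exact absurd (h.mp rfl) (by simp)
  · rfl

theorem sand_helpers_eq (e : String) : find_equal_between_char e = pvHasSandwichAlt e := rfl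

theorem foldl_count_int (P : String → Bool) (l : List String) (acc : Int) :
    l.foldl (fun n e => if P e then n + 1 else n) acc = acc + (l.countP P : Int) := by
  induction l generalizing acc with
  | nil => simp
  | cons x xs ih =>
    rw [List.foldl_cons, ih, List.countP_cons]
    cases hpx : P x
    · simp
    · simp
      omega

-- ===== VERDICT (by name: the statement is the Claim_ definition above) =====
theorem verify_new_conditions_spec : Claim_equal_verify_new_conditions := by
  intro entries _
  unfold Spec_verify_new_conditions verify_new_conditions verify_new_conditions_alt
  show (entries.foldl (fun nice entry =>
      if find_pairs_without_overlap entry && find_equal_between_char entry then nice + 1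
      else nice) 0, 0) = _
  rw [foldl_count_int, zero_add]
  rw [show (fun e => find_pairs_without_overlap e && find_equal_between_char e)
      = (fun e => pvHasPairAlt e && pvHasSandwichAlt e) from
    funext fun e => by rw [pair_helpers_eq, sand_helpers_eq]]
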